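-- pv_equiv track=rewrite | github.com/papate13/RedditTracker | reddit_tracker_core.py | normalize_subreddit_names
-- ===== SOURCE A (Python) =====
-- def normalize_subreddit_names(data):
--     """
--     Normalize all subreddit names to lowercase and merge data for duplicates.
--     """
--     if not isinstance(data, dict):
--         return data
--
--     normalized_data = {}
--
--     # Process each subreddit entry and normalize names
--     for subreddit, points in data.items():
--         # Convert to lowercase
--         norm_name = subreddit.lower()
--
--         # Initialize entry if needed
--         if norm_name not in normalized_data:
--             normalized_data[norm_name] = []
--
--         # Add all data points
--         normalized_data[norm_name].extend(points)
--
--     return normalized_data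
-- ===== SOURCE B (Python) =====
-- def normalize_subreddit_names(data):
--     """
--     Normalize all subreddit names to lowercase and merge data for duplicates.
--     """
--     if not isinstance(data, dict):
--         return data
--
--     # Distinct lowercased names in first-appearance order, then one rescan per name.
--     order = list(dict.fromkeys(name.lower() for name in data))
--     return {k: [p for name, pts in data.items() if name.lower() == k for p in pts]
--             for k in order}
-- ===== Notes on version B (the rewrite author's own statement) =====
-- stated objective: alternative
-- what changed: Replaces A's single-pass dict bucketing (init-if-missing then extend) by first computing the distinct lowercased names in first-appearance order and then building each merged list with a per-name rescan comprehension over the items.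
import Mathlib
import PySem

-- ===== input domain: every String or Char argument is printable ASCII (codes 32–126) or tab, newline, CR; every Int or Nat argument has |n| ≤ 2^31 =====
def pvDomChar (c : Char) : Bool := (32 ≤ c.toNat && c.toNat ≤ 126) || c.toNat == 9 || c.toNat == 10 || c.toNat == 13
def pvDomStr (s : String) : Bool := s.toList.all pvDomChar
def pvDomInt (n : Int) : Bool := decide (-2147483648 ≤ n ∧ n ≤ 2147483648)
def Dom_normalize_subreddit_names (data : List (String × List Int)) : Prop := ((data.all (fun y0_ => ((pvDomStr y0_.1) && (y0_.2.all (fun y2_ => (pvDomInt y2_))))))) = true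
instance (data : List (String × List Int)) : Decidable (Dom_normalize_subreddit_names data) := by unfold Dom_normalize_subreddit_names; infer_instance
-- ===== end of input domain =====

-- B replaces A's single-pass dict bucketing by "distinct lowercased names in first-appearance
-- order, then one rescan per name"; an alternative decomposition, not claimed faster.


-- ===== PORT A =====
-- the 'isinstance(data, dict)' guard is a runtime type check: under the type convention the
-- argument is always the dict, so the guard never fires and is not ported.
def normalize_subreddit_names (data : List (String × List Int)) : List (String × List Int) :=
  let normalized : PySem.Dict String (List Int) :=
    data.foldl (fun d kv =>
      let nk := PySem.Str.lower kv.1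
      -- if norm_name not in normalized_data: normalized_data[norm_name] = []
      let d := if d.contains nk then d else d.insert nk ([] : List Int)
      -- normalized_data[norm_name].extend(points)
      d.insert nk (d.getD nk [] ++ kv.2)) PySem.Dict.empty
  normalized.items

-- ===== PORT B =====
def normalize_subreddit_names_alt (data : List (String × List Int)) : List (String × List Int) :=
  let order := PySem.List.dedup (data.map (fun kv => PySem.Str.lower kv.1))
  order.map (fun k =>
    (k, data.flatMap (fun kv => if PySem.Str.lower kv.1 = k then kv.2 else [])))

-- ===== PRECONDITION & SPEC =====
def Spec_normalize_subreddit_names (data : List (String × List Int)) (out : List (String × List Int)) : Prop := out = normalize_subreddit_names_alt data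
instance (data : List (String × List Int)) (out : List (String × List Int)) : Decidable (Spec_normalize_subreddit_names data out) := by unfold Spec_normalize_subreddit_names; infer_instance

-- ===== CLAIM (what is proved, stated in full; the proofs are below) =====
def Claim_equal_normalize_subreddit_names : Prop := ∀ (data : List (String × List Int)), Dom_normalize_subreddit_names data → Spec_normalize_subreddit_names data (normalize_subreddit_names data)

-- ===== LEMMAS AND PROOFS =====

-- A's loop body (guarded init + extend) is one insert of (old value ++ points)
theorem pvStep_eq (d : PySem.Dict String (List Int)) (kv : String × List Int) :
    (let nk := PySem.Str.lower kv.1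
     let d := if d.contains nk then d else d.insert nk ([] : List Int)
     d.insert nk (d.getD nk [] ++ kv.2)) =
    d.insert (PySem.Str.lower kv.1) (d.getD (PySem.Str.lower kv.1) [] ++ kv.2) := by
  by_cases h : d.contains (PySem.Str.lower kv.1)
  · simp [h]
  · simp only [Bool.not_eq_true] at h
    simp [h, PySem.Dict.insert_insert_self, PySem.Dict.getD_insert_self]
    rw [PySem.Dict.getD_of_not_contains (h := h), List.nil_append]

-- value at any key after the fold
theorem pvGetD_fold (l : List (String × List Int)) (d : PySem.Dict String (List Int)) (c : String) :
    (l.foldl (fun d kv => d.insert (PySem.Str.lower kv.1)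
        (d.getD (PySem.Str.lower kv.1) [] ++ kv.2)) d).getD c [] =
      d.getD c [] ++ l.flatMap (fun kv => if PySem.Str.lower kv.1 = c then kv.2 else []) := by
  induction l generalizing d with
  | nil => simp
  | cons kv t ih =>
    simp only [List.foldl_cons, List.flatMap_cons, ih, PySem.Dict.getD_insert]
    by_cases h : c = PySem.Str.lower kv.1
    · subst h
      rw [if_pos rfl, if_pos rfl, List.append_assoc]
    · rw [if_neg h, if_neg (fun hh => h hh.symm), List.nil_append]

theorem pvNormalizeEq (data : List (String × List Int)) :
    normalize_subreddit_names data = normalize_subreddit_names_alt data := by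
  unfold normalize_subreddit_names normalize_subreddit_names_alt
  have hstep : (fun (d : PySem.Dict String (List Int)) (kv : String × List Int) =>
      let nk := PySem.Str.lower kv.1
      let d := if d.contains nk then d else d.insert nk ([] : List Int)
      d.insert nk (d.getD nk [] ++ kv.2)) =
      (fun d kv => d.insert (PySem.Str.lower kv.1) (d.getD (PySem.Str.lower kv.1) [] ++ kv.2)) :=
    funext fun d => funext fun kv => pvStep_eq d kv
  simp only [hstep]
  set D := data.foldl (fun d kv => d.insert (PySem.Str.lower kv.1)
      (d.getD (PySem.Str.lower kv.1) [] ++ kv.2)) PySem.Dict.empty with hD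
  have hkeys : D.keys = PySem.List.dedup (data.map (fun kv => PySem.Str.lower kv.1)) := by
    rw [hD, PySem.Dict.keys_foldl_insert_key]
    simp [PySem.Dict.keys_empty, PySem.Set.update_nil_left]
  have hnodup : D.keys.Nodup := by
    rw [hD]
    exact PySem.Dict.nodup_keys_foldl_insert_key _ _ _ _ (by simp [PySem.Dict.keys_empty])
  rw [PySem.Dict.items_eq_map_keys D hnodup ([] : List Int), hkeys]
  refine List.map_congr_left fun k hk => ?_
  rw [hD, pvGetD_fold]
  simp

-- ===== VERDICT (by name: the statement is the Claim_ definition above) =====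
theorem normalize_subreddit_names_spec : Claim_equal_normalize_subreddit_names := by
  intro data _
  unfold Spec_normalize_subreddit_names
  exact pvNormalizeEq data
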